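-- pv_equiv track=rewrite | github.com/Lucas-Guimaraes/Reddit-Daily-Programmer | Easy Problems/391-400/397easy.py | numcompare
-- ===== SOURCE A (Python) =====
-- def numcompare(a, b):
--     roman_numerals = "MDCLXVI"
--
--     for r in roman_numerals:
--         #If in both
--         if r in b and r in a:
--             a_c, b_c = a.count(r), b.count(r)
--             #If either is bigger, return
--             if b_c > a_c:
--                 return True
--             elif a_c > b_c:
--                 return False
--
--         #If only in b
--         elif r in b and r not in a:
--             return True
--         #If only in a
--         elif r in a and r not in b:
--             return False
--
--     #Final False,, in-case no Truth is found
--     return False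
-- ===== SOURCE B (Python) =====
-- def numcompare(a, b):
--     ka = tuple(a.count(r) for r in "MDCLXVI")
--     kb = tuple(b.count(r) for r in "MDCLXVI")
--     return kb > ka
-- ===== Notes on version B (the rewrite author's own statement) =====
-- stated objective: simpler
-- what changed: Replaces A's interleaved per-letter early-exit branch cascade (membership tests plus conditional count comparisons) with building one priority-ordered count key per string and returning a single lexicographic tuple comparison kb > ka.
import Mathlib
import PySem

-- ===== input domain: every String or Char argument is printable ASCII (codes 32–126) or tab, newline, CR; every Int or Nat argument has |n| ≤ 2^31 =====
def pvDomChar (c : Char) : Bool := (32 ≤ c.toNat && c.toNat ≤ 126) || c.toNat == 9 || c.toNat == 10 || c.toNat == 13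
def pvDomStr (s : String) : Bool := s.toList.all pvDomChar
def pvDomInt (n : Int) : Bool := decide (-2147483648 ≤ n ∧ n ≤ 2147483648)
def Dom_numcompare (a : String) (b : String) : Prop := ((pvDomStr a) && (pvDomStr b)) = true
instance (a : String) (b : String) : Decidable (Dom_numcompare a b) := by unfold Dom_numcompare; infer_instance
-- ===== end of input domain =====

-- B replaces A's per-letter early-exit branch cascade with two full count keys and one lexicographic comparison (objective: simpler).

-- ===== PORT A =====
-- roman_numerals = "MDCLXVI"
def pvRomans : List Char := ['M', 'D', 'C', 'L', 'X', 'V', 'I']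

-- the 'for r in roman_numerals' loop with its early returns
def numcompareGo (a b : String) : List Char → Bool
  | [] => false                      -- Final False, in-case no Truth is found
  | r :: rs =>
    let rS : String := String.ofList [r]
    if PySem.Str.isIn rS b && PySem.Str.isIn rS a then          -- If in both
      let a_c := PySem.Str.count a rS
      let b_c := PySem.Str.count b rS
      if b_c > a_c then true
      else if a_c > b_c then false
      else numcompareGo a b rs
    else if PySem.Str.isIn rS b && !(PySem.Str.isIn rS a) then true   -- If only in b
    else if PySem.Str.isIn rS a && !(PySem.Str.isIn rS b) then false  -- If only in a
    else numcompareGo a b rs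

def numcompare (a : String) (b : String) : Bool := numcompareGo a b pvRomans

-- ===== PORT B =====
-- Python's '>' on equal-arity tuples of ints: lexicographic, first differing slot decides
def lexGtNat : List Nat → List Nat → Bool
  | x :: xs, y :: ys =>
    if y < x then true
    else if x < y then false
    else lexGtNat xs ys
  | _ :: _, [] => true
  | [], _ => false

-- ka/kb = tuple(s.count(r) for r in "MDCLXVI")
def pvKey (s : String) : List Nat := pvRomans.map (fun r => PySem.Str.count s (String.ofList [r]))

def numcompare_alt (a : String) (b : String) : Bool := lexGtNat (pvKey b) (pvKey a)

-- ===== PRECONDITION & SPEC =====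
def Spec_numcompare (a : String) (b : String) (out : Bool) : Prop := out = numcompare_alt a b
instance (a : String) (b : String) (out : Bool) : Decidable (Spec_numcompare a b out) := by unfold Spec_numcompare; infer_instance

-- ===== CLAIM (what is proved, stated in full; the proofs are below) =====
def Claim_equal_numcompare : Prop := ∀ (a : String) (b : String), Dom_numcompare a b → Spec_numcompare a b (numcompare a b)

-- ===== LEMMAS AND PROOFS =====

-- single-char substring count = character count
theorem countgo_single (c : Char) : ∀ (fuel : Nat) (l : List Char) (acc : Nat),
    l.length ≤ fuel → PySem.Chars.count.go [c] fuel l acc = acc + l.count c := by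
  intro fuel
  induction fuel with
  | zero =>
    intro l acc h
    cases l with
    | nil => simp [PySem.Chars.count.go]
    | cons x t => simp at h
  | succ n ih =>
    intro l acc h
    cases l with
    | nil => simp [PySem.Chars.count.go]
    | cons x t =>
      simp only [PySem.Chars.count.go]
      have ht : t.length ≤ n := by simp at h; omega
      by_cases hx : c = x
      · subst hx
        simp only [List.isPrefixOf, beq_self_eq_true, Bool.true_and,
          if_pos, List.length_singleton, List.drop_succ_cons, List.drop_zero]
        rw [ih t (acc + 1) ht]
        simp [List.count_cons]
        omega
      · have hbeq : (c == x) = false := beq_false_of_ne hx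
        have hpre : [c].isPrefixOf (x :: t) = false := by
          simp [List.isPrefixOf, hbeq]
        simp only [hpre, Bool.false_eq_true, if_false]
        rw [ih t acc ht]
        simp [List.count_cons, hx]
        exact Ne.symm hx

theorem count_single (c : Char) (s : String) :
    PySem.Str.count s (String.ofList [c]) = s.toList.count c := by
  have h1 : (String.ofList [c]).toList = [c] := by simp
  rw [PySem.Str.count_eq, h1]
  unfold PySem.Chars.count
  simp only [List.isEmpty_cons, Bool.false_eq_true, if_false]
  simpa using countgo_single c s.toList.length s.toList 0 le_rfl

theorem isIn_single (c : Char) (s : String) :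
    PySem.Str.isIn (String.ofList [c]) s = decide (0 < s.toList.count c) := by
  have hiff : PySem.Str.isIn (String.ofList [c]) s = true ↔ c ∈ s.toList := by
    rw [PySem.Str.isIn_iff_infix]
    have h1 : (String.ofList [c]).toList = [c] := by simp
    rw [h1]
    constructor
    · intro hin
      exact hin.subset (List.mem_singleton_self c)
    · intro hm
      obtain ⟨l1, l2, happ⟩ := List.append_of_mem hm
      exact ⟨l1, l2, by rw [happ]; simp⟩
  by_cases h : c ∈ s.toList
  · rw [hiff.mpr h]
    simp [List.count_pos_iff, h]
  · have hfalse : PySem.Str.isIn (String.ofList [c]) s = false := by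
      cases hv : PySem.Str.isIn (String.ofList [c]) s
      · rfl
      · exact absurd (hiff.mp hv) h
    rw [hfalse]
    simp [List.count_pos_iff, h]

theorem go_eq_lexGt (a b : String) (ls : List Char) :
    numcompareGo a b ls =
      lexGtNat (ls.map (fun r => PySem.Str.count b (String.ofList [r])))
               (ls.map (fun r => PySem.Str.count a (String.ofList [r]))) := by
  induction ls with
  | nil => simp [numcompareGo, lexGtNat]
  | cons r rs ih =>
    simp only [numcompareGo, List.map_cons, lexGtNat, isIn_single, count_single, ih]
    split_ifs <;>
      first
      | rfl
      | (exfalso; simp_all [← List.count_pos_iff, ← List.count_eq_zero])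

-- ===== VERDICT (by name: the statement is the Claim_ definition above) =====
theorem numcompare_spec : Claim_equal_numcompare := by
  intro a b _
  unfold Spec_numcompare numcompare numcompare_alt pvKey
  exact go_eq_lexGt a b pvRomans
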